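-- pv_equiv track=rewrite | github.com/xcocoa/maple_auto | maple_auto_roguelike/modules/minimap_lite.py | _cluster_points
-- ===== SOURCE A (Python) =====
-- from typing import Optional, List, Tuple
--
-- CLUSTER_DISTANCE = 15
--
-- def _cluster_points(points: List[Tuple[int, int]]) -> List[Tuple[int, int]]:
--     """
--     将相近的点聚类合并。
--     使用简单的贪心聚类：遍历所有点，如果和已有簇中心距离
--     小于 CLUSTER_DISTANCE，则归入该簇，否则新建簇。
--     返回每个簇的中心点。
--     """
--     if not points:
--         return []
--
--     clusters: List[List[Tuple[int, int]]] = []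
--
--     for px, py in points:
--         merged = False
--         for cluster in clusters:
--             cx = sum(p[0] for p in cluster) // len(cluster)
--             cy = sum(p[1] for p in cluster) // len(cluster)
--             if abs(px - cx) + abs(py - cy) <= CLUSTER_DISTANCE:
--                 cluster.append((px, py))
--                 merged = True
--                 break
--         if not merged:
--             clusters.append([(px, py)])
--
--     # 返回每个簇的中心
--     centers = []
--     for cluster in clusters:
--         cx = sum(p[0] for p in cluster) // len(cluster)
--         cy = sum(p[1] for p in cluster) // len(cluster)
--         centers.append((cx, cy))
--
--     return centers
-- ===== SOURCE B (Python) =====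
-- from typing import List, Tuple
--
-- CLUSTER_DISTANCE = 15
-- _CELL = CLUSTER_DISTANCE + 1
--
--
-- def _cluster_points(points: List[Tuple[int, int]]) -> List[Tuple[int, int]]:
--     # Spatial hash grid: each cluster is a running (sum_x, sum_y, count) triple,
--     # and a dict maps a 16x16 grid cell to the ids of clusters whose center lies
--     # in that cell, so a point is compared only against clusters in the 3x3
--     # neighbouring cells instead of scanning every cluster.  The greedy
--     # first-fit cluster is the qualifying cluster with the smallest id, and any
--     # qualifying center lies in the neighbourhood, so taking min over the
--     # neighbourhood candidates is exact.
--     clusters: List[Tuple[int, int, int]] = []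
--     grid = {}
--     for px, py in points:
--         ccx, ccy = px // _CELL, py // _CELL
--         cand = []
--         for dx in (-1, 0, 1):
--             for dy in (-1, 0, 1):
--                 cand += grid.get((ccx + dx, ccy + dy), [])
--         qual = [i for i in cand
--                 if abs(px - clusters[i][0] // clusters[i][2])
--                 + abs(py - clusters[i][1] // clusters[i][2]) <= CLUSTER_DISTANCE]
--         if qual:
--             i = min(qual)
--             sx, sy, n = clusters[i]
--             old = (sx // n // _CELL, sy // n // _CELL)
--             sx, sy, n = sx + px, sy + py, n + 1
--             clusters[i] = (sx, sy, n)
--             new = (sx // n // _CELL, sy // n // _CELL)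
--             if old != new:
--                 grid[old] = [j for j in grid.get(old, []) if j != i]
--                 grid[new] = grid.get(new, []) + [i]
--         else:
--             i = len(clusters)
--             clusters.append((px, py, 1))
--             cell = (px // _CELL, py // _CELL)
--             grid[cell] = grid.get(cell, []) + [i]
--     return [(sx // n, sy // n) for sx, sy, n in clusters]
-- ===== Notes on version B (the rewrite author's own statement) =====
-- stated objective: faster
-- what changed: B replaces A's first-fit linear scan over all clusters (re-summing every cluster's members at each comparison) with a spatial hash grid: clusters are running (sum_x, sum_y, count) triples and a dict maps each 16x16 cell to the ids of clusters centered there, so each point is compared only against clusters in the 3x3 neighbouring cells and the first-fit choice is recovered as the minimum qualifying id.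
import Mathlib
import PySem

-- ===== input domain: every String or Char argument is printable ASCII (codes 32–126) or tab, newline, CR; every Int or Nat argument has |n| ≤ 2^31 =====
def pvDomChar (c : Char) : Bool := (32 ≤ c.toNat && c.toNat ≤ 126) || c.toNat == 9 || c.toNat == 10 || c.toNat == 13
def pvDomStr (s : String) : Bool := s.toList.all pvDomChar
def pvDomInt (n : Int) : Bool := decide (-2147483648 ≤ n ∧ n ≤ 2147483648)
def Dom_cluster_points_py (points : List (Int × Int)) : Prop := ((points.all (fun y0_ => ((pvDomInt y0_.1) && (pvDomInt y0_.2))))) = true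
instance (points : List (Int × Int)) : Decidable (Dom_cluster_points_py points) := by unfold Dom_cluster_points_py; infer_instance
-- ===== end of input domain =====

-- B replaces A's linear first-fit scan over all clusters (with per-step re-summation)
-- by a spatial hash grid over cluster centers keeping running (sum,count) triples;
-- objective: faster (measured asymptotic speed-up).

-- ===== PORT A =====
-- center of a cluster as A computes it: sum of coords floor-divided by length
def pvACenter (c : List (Int × Int)) : Int × Int :=
  (PySem.Int.floordiv ((c.map Prod.fst).sum) (c.length : Int),
   PySem.Int.floordiv ((c.map Prod.snd).sum) (c.length : Int))

-- A's inner loop: try each existing cluster in order, append to the first near one, else start a new cluster at the end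
def pvAInsert (clusters : List (List (Int × Int))) (p : Int × Int) : List (List (Int × Int)) :=
  match clusters with
  | [] => [[p]]
  | c :: rest =>
    if (p.1 - (pvACenter c).1).natAbs + (p.2 - (pvACenter c).2).natAbs ≤ 15 then
      (c ++ [p]) :: rest
    else
      c :: pvAInsert rest p

def cluster_points_py (points : List (Int × Int)) : List (Int × Int) :=
  if points = [] then []
  else (points.foldl pvAInsert []).map pvACenter

-- ===== PORT B =====
-- is the point (px,py) within CLUSTER_DISTANCE of the center of running triple c = (sum_x, sum_y, count)?
def pvQual (px py : Int) (c : Int × Int × Int) : Bool :=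
  decide ((px - PySem.Int.floordiv c.1 c.2.2).natAbs + (py - PySem.Int.floordiv c.2.1 c.2.2).natAbs ≤ 15)

-- grid cell of a coordinate pair (cell size _CELL = 16)
def pvCell (x y : Int) : Int × Int := (PySem.Int.floordiv x 16, PySem.Int.floordiv y 16)

-- cell of a triple's center (Source B: sx // n // _CELL, sy // n // _CELL)
def pvCellOf (c : Int × Int × Int) : Int × Int :=
  pvCell (PySem.Int.floordiv c.1 c.2.2) (PySem.Int.floordiv c.2.1 c.2.2)

-- Source B's candidate-gathering double loop over the 3x3 cell neighbourhood
def pvCand (grid : PySem.Dict (Int × Int) (List Nat)) (cc : Int × Int) : List Nat :=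
  [(-1 : Int), 0, 1].flatMap (fun dx =>
    [(-1 : Int), 0, 1].flatMap (fun dy => grid.getD (cc.1 + dx, cc.2 + dy) []))

-- one iteration of Source B's main loop; state = (clusters as running triples, cell → cluster ids).
-- Source B's `clusters[i]` is always in range (the grid only stores valid ids), so List.getD is exact.
def pvGStep (st : List (Int × Int × Int) × PySem.Dict (Int × Int) (List Nat))
    (p : Int × Int) : List (Int × Int × Int) × PySem.Dict (Int × Int) (List Nat) :=
  let clusters := st.1
  let grid := st.2
  let qual := (pvCand grid (pvCell p.1 p.2)).filter
    (fun i => pvQual p.1 p.2 (clusters.getD i (0, 0, 1)))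
  match PySem.List.min? qual (fun i => i) with
  | some i =>
    let c := clusters.getD i (0, 0, 1)
    let t := (c.1 + p.1, c.2.1 + p.2, c.2.2 + 1)
    let clusters' := clusters.set i t
    if pvCellOf c ≠ pvCellOf t then
      let g1 := grid.insert (pvCellOf c) ((grid.getD (pvCellOf c) []).filter (fun j => j ≠ i))
      (clusters', g1.insert (pvCellOf t) (g1.getD (pvCellOf t) [] ++ [i]))
    else (clusters', grid)
  | none =>
    (clusters ++ [(p.1, p.2, 1)],
     grid.insert (pvCell p.1 p.2) (grid.getD (pvCell p.1 p.2) [] ++ [clusters.length]))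

def cluster_points_py_alt (points : List (Int × Int)) : List (Int × Int) :=
  ((points.foldl pvGStep ([], PySem.Dict.empty)).1).map
    (fun c => (PySem.Int.floordiv c.1 c.2.2, PySem.Int.floordiv c.2.1 c.2.2))

-- ===== PRECONDITION & SPEC =====
def Spec_cluster_points_py (points : List (Int × Int)) (out : List (Int × Int)) : Prop := out = cluster_points_py_alt points
instance (points : List (Int × Int)) (out : List (Int × Int)) : Decidable (Spec_cluster_points_py points out) := by unfold Spec_cluster_points_py; infer_instance

-- ===== CLAIM (what is proved, stated in full; the proofs are below) =====
def Claim_equal_cluster_points_py : Prop := ∀ (points : List (Int × Int)), Dom_cluster_points_py points → Spec_cluster_points_py points (cluster_points_py points)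

-- ===== LEMMAS AND PROOFS =====

-- abstraction: a member list to its running-triple summary
def pvAbs (c : List (Int × Int)) : Int × Int × Int :=
  ((c.map Prod.fst).sum, (c.map Prod.snd).sum, (c.length : Int))

-- first-fit on triples: the intermediate description both ports are matched against
def pvBInsert (clusters : List (Int × Int × Int)) (p : Int × Int) : List (Int × Int × Int) :=
  match clusters with
  | [] => [(p.1, p.2, 1)]
  | c :: rest =>
    if pvQual p.1 p.2 c then (c.1 + p.1, c.2.1 + p.2, c.2.2 + 1) :: rest
    else c :: pvBInsert rest p

-- grid invariant: a bucket holds exactly the ids of the clusters centered in that cell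
def pvGridInv (CB : List (Int × Int × Int)) (G : PySem.Dict (Int × Int) (List Nat)) : Prop :=
  ∀ k i, i ∈ G.getD k [] ↔ ∃ h : i < CB.length, pvCellOf CB[i] = k

theorem pvAbs_center (c : List (Int × Int)) :
    (PySem.Int.floordiv (pvAbs c).1 (pvAbs c).2.2,
     PySem.Int.floordiv (pvAbs c).2.1 (pvAbs c).2.2) = pvACenter c := by
  simp [pvAbs, pvACenter]

theorem pvInsert_comm (clusters : List (List (Int × Int))) (p : Int × Int) :
    pvBInsert (clusters.map pvAbs) p = (pvAInsert clusters p).map pvAbs := by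
  induction clusters with
  | nil => simp [pvAInsert, pvBInsert, pvAbs]
  | cons c rest ih =>
    simp only [List.map_cons, pvAInsert, pvBInsert, pvAbs, pvACenter, pvQual,
      decide_eq_true_eq]
    split_ifs with hq <;> simp_all [pvAbs]

theorem pvFoldl_comm (points : List (Int × Int)) (clusters : List (List (Int × Int))) :
    points.foldl pvBInsert (clusters.map pvAbs)
      = (points.foldl pvAInsert clusters).map pvAbs := by
  induction points generalizing clusters with
  | nil => rfl
  | cons p ps ih => simpa [List.foldl_cons, pvInsert_comm] using ih (pvAInsert clusters p)

-- pvBInsert when no cluster qualifies: append a fresh triple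
theorem pvBInsert_none (CB : List (Int × Int × Int)) (p : Int × Int)
    (h : ∀ c ∈ CB, pvQual p.1 p.2 c = false) :
    pvBInsert CB p = CB ++ [(p.1, p.2, 1)] := by
  induction CB with
  | nil => rfl
  | cons c rest ih =>
    rw [pvBInsert, if_neg (by simp [h c (by simp)]), ih (fun c hc => h c (by simp [hc]))]
    rfl

-- pvBInsert when i is the least qualifying index: update in place at i
theorem pvBInsert_some (CB : List (Int × Int × Int)) (p : Int × Int) (i : Nat)
    (hi : i < CB.length) (hq : pvQual p.1 p.2 CB[i] = true)
    (hmin : ∀ j (hj : j < i), pvQual p.1 p.2 (CB[j]'(by omega)) = false) :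
    pvBInsert CB p = CB.set i (CB[i].1 + p.1, CB[i].2.1 + p.2, CB[i].2.2 + 1) := by
  induction CB generalizing i with
  | nil => simp at hi
  | cons c rest ih =>
    cases i with
    | zero => simp only [pvBInsert]; rw [if_pos (by simpa using hq)]; rfl
    | succ j =>
      have h0 : pvQual p.1 p.2 c = false := by simpa using hmin 0 (by omega)
      simp only [pvBInsert]; rw [if_neg (by simp [h0])]
      have := ih j (by simpa using hi) (by simpa using hq)
        (fun m hm => by simpa using hmin (m + 1) (by omega))
      simp [this]

-- a qualifying center's cell is in the 3x3 neighbourhood of the point's cell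
theorem pvQual_cell (px py : Int) (c : Int × Int × Int) (h : pvQual px py c = true) :
    ∃ dx ∈ [(-1 : Int), 0, 1], ∃ dy ∈ [(-1 : Int), 0, 1],
      pvCellOf c = ((pvCell px py).1 + dx, (pvCell px py).2 + dy) := by
  simp only [pvQual, decide_eq_true_eq] at h
  have e16 : ∀ a : Int, PySem.Int.floordiv a 16 = a / 16 :=
    fun a => PySem.Int.floordiv_eq_ediv_of_pos (by norm_num)
  refine ⟨PySem.Int.floordiv c.1 c.2.2 / 16 - px / 16, by simp; omega,
          PySem.Int.floordiv c.2.1 c.2.2 / 16 - py / 16, by simp; omega, ?_⟩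
  simp [pvCellOf, pvCell]

-- under the invariant, membership in Source B's `qual` list is exactly "valid id whose cluster qualifies"
theorem pvQual_mem (CB : List (Int × Int × Int)) (G : PySem.Dict (Int × Int) (List Nat))
    (p : Int × Int) (hinv : pvGridInv CB G) (i : Nat) :
    (i ∈ (pvCand G (pvCell p.1 p.2)).filter
      (fun i => pvQual p.1 p.2 (CB.getD i (0, 0, 1)))) ↔
    ∃ h : i < CB.length, pvQual p.1 p.2 CB[i] = true := by
  rw [List.mem_filter]
  constructor
  · rintro ⟨hc, hq⟩
    simp only [pvCand, List.mem_flatMap] at hc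
    obtain ⟨dx, -, dy, -, hb⟩ := hc
    obtain ⟨hlen, -⟩ := (hinv _ i).1 hb
    exact ⟨hlen, by rwa [List.getD_eq_getElem _ _ hlen] at hq⟩
  · rintro ⟨hlen, hq⟩
    obtain ⟨dx, hdx, dy, hdy, hcell⟩ := pvQual_cell p.1 p.2 CB[i] hq
    refine ⟨?_, by rwa [List.getD_eq_getElem _ _ hlen]⟩
    simp only [pvCand, List.mem_flatMap]
    exact ⟨dx, hdx, dy, hdy, (hinv _ i).2 ⟨hlen, hcell⟩⟩

-- invariant after starting a new cluster
theorem pvInv_new (CB : List (Int × Int × Int)) (G : PySem.Dict (Int × Int) (List Nat))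
    (p : Int × Int) (hinv : pvGridInv CB G) :
    pvGridInv (CB ++ [(p.1, p.2, 1)])
      (G.insert (pvCell p.1 p.2) (G.getD (pvCell p.1 p.2) [] ++ [CB.length])) := by
  have hc1 : pvCellOf (p.1, p.2, 1) = pvCell p.1 p.2 := by simp [pvCellOf]
  intro k j
  rw [PySem.Dict.getD_insert]
  have hlen : (CB ++ [(p.1, p.2, 1)]).length = CB.length + 1 := by simp
  by_cases hk : k = pvCell p.1 p.2
  · subst hk
    rw [if_pos rfl]
    simp only [List.mem_append, List.mem_singleton]
    constructor
    · rintro (hj | rfl)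
      · obtain ⟨hl, hc⟩ := (hinv _ j).1 hj
        exact ⟨by rw [hlen]; omega, by rw [List.getElem_append_left hl]; exact hc⟩
      · exact ⟨by rw [hlen]; omega, by rw [List.getElem_concat_length rfl]; exact hc1⟩
    · rintro ⟨hl, hc⟩
      rw [hlen] at hl
      rcases Nat.lt_or_ge j CB.length with hj | hj
      · left
        exact (hinv _ j).2 ⟨hj, by rwa [List.getElem_append_left hj] at hc⟩
      · right; omega
  · rw [if_neg hk]
    constructor
    · intro hj
      obtain ⟨hl, hc⟩ := (hinv _ j).1 hj
      exact ⟨by rw [hlen]; omega, by rw [List.getElem_append_left hl]; exact hc⟩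
    · rintro ⟨hl, hc⟩
      have hl' : j < CB.length + 1 := by rw [hlen] at hl; exact hl
      have hj : j < CB.length := by
        rcases Nat.lt_or_ge j CB.length with hj | hj
        · exact hj
        · exfalso
          have he : j = CB.length := by omega
          subst he
          rw [List.getElem_concat_length rfl] at hc
          exact hk (by rw [← hc, hc1])
      exact (hinv _ j).2 ⟨hj, by rwa [List.getElem_append_left hj] at hc⟩

-- invariant after an in-place update whose center stays in the same cell
theorem pvInv_stay (CB : List (Int × Int × Int)) (G : PySem.Dict (Int × Int) (List Nat))
    (hinv : pvGridInv CB G) (i : Nat) (hi : i < CB.length) (t : Int × Int × Int)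
    (ht : pvCellOf t = pvCellOf CB[i]) : pvGridInv (CB.set i t) G := by
  intro k j
  rw [hinv k j]
  have hlen : (CB.set i t).length = CB.length := by simp
  constructor
  · rintro ⟨hl, hc⟩
    refine ⟨by rw [hlen]; omega, ?_⟩
    rw [List.getElem_set]
    by_cases he : i = j
    · subst he; rw [if_pos rfl, ht]; exact hc
    · rw [if_neg he]; exact hc
  · rintro ⟨hl, hc⟩
    rw [List.getElem_set] at hc
    refine ⟨by rw [hlen] at hl; omega, ?_⟩
    by_cases he : i = j
    · subst he; rw [if_pos rfl] at hc; rwa [ht] at hc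
    · rwa [if_neg he] at hc

-- invariant after an in-place update whose center moves to a different cell
theorem pvInv_move (CB : List (Int × Int × Int)) (G : PySem.Dict (Int × Int) (List Nat))
    (hinv : pvGridInv CB G) (i : Nat) (hi : i < CB.length) (t : Int × Int × Int)
    (hne : pvCellOf CB[i] ≠ pvCellOf t) :
    pvGridInv (CB.set i t)
      ((G.insert (pvCellOf CB[i]) ((G.getD (pvCellOf CB[i]) []).filter (fun j => j ≠ i))).insert
        (pvCellOf t)
        (((G.insert (pvCellOf CB[i]) ((G.getD (pvCellOf CB[i]) []).filter (fun j => j ≠ i))).getD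
          (pvCellOf t) []) ++ [i])) := by
  intro k j
  rw [PySem.Dict.getD_insert, PySem.Dict.getD_insert, PySem.Dict.getD_insert,
    if_neg hne.symm]
  have hlen : (CB.set i t).length = CB.length := by simp
  by_cases hk : k = pvCellOf t
  · subst hk
    rw [if_pos rfl]
    simp only [List.mem_append, List.mem_singleton]
    constructor
    · rintro (hj | rfl)
      · obtain ⟨hl, hc⟩ := (hinv _ j).1 hj
        have hji : i ≠ j := fun he => hne (by subst he; exact hc)
        refine ⟨by rw [hlen]; omega, ?_⟩
        rw [List.getElem_set, if_neg hji]; exact hc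
      · refine ⟨by rw [hlen]; omega, ?_⟩
        rw [List.getElem_set, if_pos rfl]
    · rintro ⟨hl, hc⟩
      rw [List.getElem_set] at hc
      by_cases he : i = j
      · right; omega
      · left
        rw [if_neg he] at hc
        exact (hinv _ j).2 ⟨by rw [hlen] at hl; omega, hc⟩
  · rw [if_neg hk]
    by_cases hk' : k = pvCellOf CB[i]
    · subst hk'
      rw [if_pos rfl]
      simp only [List.mem_filter, decide_eq_true_eq]
      constructor
      · rintro ⟨hj, hji⟩
        obtain ⟨hl, hc⟩ := (hinv _ j).1 hj
        refine ⟨by rw [hlen]; omega, ?_⟩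
        rw [List.getElem_set, if_neg (fun he => hji he.symm)]; exact hc
      · rintro ⟨hl, hc⟩
        rw [List.getElem_set] at hc
        by_cases he : i = j
        · exfalso; rw [if_pos he] at hc; exact hk hc.symm
        · rw [if_neg he] at hc
          exact ⟨(hinv _ j).2 ⟨by rw [hlen] at hl; omega, hc⟩, fun hji => he hji.symm⟩
    · rw [if_neg hk']
      constructor
      · intro hj
        obtain ⟨hl, hc⟩ := (hinv _ j).1 hj
        have hji : i ≠ j := fun he => hk' (by subst he; exact hc.symm)
        refine ⟨by rw [hlen]; omega, ?_⟩
        rw [List.getElem_set, if_neg hji]; exact hc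
      · rintro ⟨hl, hc⟩
        rw [List.getElem_set] at hc
        by_cases he : i = j
        · exfalso; rw [if_pos he] at hc; exact hk hc.symm
        · rw [if_neg he] at hc
          exact (hinv _ j).2 ⟨by rw [hlen] at hl; omega, hc⟩

-- the step of B computes pvBInsert on the cluster list and preserves the invariant
theorem pvGStep_spec (CB : List (Int × Int × Int)) (G : PySem.Dict (Int × Int) (List Nat))
    (p : Int × Int) (hinv : pvGridInv CB G) :
    (pvGStep (CB, G) p).1 = pvBInsert CB p ∧
      pvGridInv (pvGStep (CB, G) p).1 (pvGStep (CB, G) p).2 := by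
  rcases hq : PySem.List.min? ((pvCand G (pvCell p.1 p.2)).filter
      (fun i => pvQual p.1 p.2 (CB.getD i (0, 0, 1)))) (fun i => i) with _ | i
  · have hnil := (PySem.List.min?_eq_none_iff _ _).1 hq
    have hnone : ∀ c ∈ CB, pvQual p.1 p.2 c = false := by
      intro c hc
      obtain ⟨j, hj, rfl⟩ := List.getElem_of_mem hc
      by_contra hne
      have hj' := (pvQual_mem CB G p hinv j).2 ⟨hj, by simpa using hne⟩
      rw [hnil] at hj'
      simp at hj'
    constructor
    · simp only [pvGStep, hq]
      rw [pvBInsert_none CB p hnone]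
    · simp only [pvGStep, hq]
      exact pvInv_new CB G p hinv
  · have himem := PySem.List.min?_mem hq
    obtain ⟨hilen, hiq⟩ := (pvQual_mem CB G p hinv i).1 himem
    have hmin : ∀ j (hj : j < i), pvQual p.1 p.2 (CB[j]'(by omega)) = false := by
      intro j hj
      by_contra hne
      have hjl : j < CB.length := by omega
      have hle : i ≤ j := by
        simpa using PySem.List.min?_isMin hq j
          ((pvQual_mem CB G p hinv j).2 ⟨hjl, by simpa using hne⟩)
      omega
    have hb := pvBInsert_some CB p i hilen hiq hmin
    have hcd : CB.getD i (0, 0, 1) = CB[i] := List.getD_eq_getElem _ _ hilen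
    simp only [pvGStep, hq, hcd]
    split_ifs with hcell
    · exact ⟨by rw [hb], pvInv_move CB G hinv i hilen _ hcell⟩
    · exact ⟨by rw [hb], pvInv_stay CB G hinv i hilen _ (not_ne_iff.mp hcell).symm⟩

theorem pvGFold (points : List (Int × Int)) (st : List (Int × Int × Int) × PySem.Dict (Int × Int) (List Nat))
    (hinv : pvGridInv st.1 st.2) :
    (points.foldl pvGStep st).1 = points.foldl pvBInsert st.1 := by
  induction points generalizing st with
  | nil => rfl
  | cons p ps ih =>
    obtain ⟨h1, h2⟩ := pvGStep_spec st.1 st.2 p hinv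
    simpa [List.foldl_cons, h1] using (by simpa [h1] using ih (pvGStep st p) h2)

theorem pvGridInv_empty : pvGridInv [] PySem.Dict.empty := by
  intro k i
  simp [PySem.Dict.getD, PySem.Dict.empty, PySem.Dict.get?]

-- ===== VERDICT (by name: the statement is the Claim_ definition above) =====
theorem cluster_points_py_spec : Claim_equal_cluster_points_py := by
  intro points _
  unfold Spec_cluster_points_py cluster_points_py cluster_points_py_alt
  rcases eq_or_ne points [] with h | h
  · simp [h]
  · have hg : (points.foldl pvGStep ([], PySem.Dict.empty)).1
        = points.foldl pvBInsert [] := pvGFold points ([], PySem.Dict.empty) pvGridInv_empty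
    have hb : points.foldl pvBInsert (([] : List (List (Int × Int))).map pvAbs)
        = (points.foldl pvAInsert []).map pvAbs := pvFoldl_comm points []
    simp only [List.map_nil] at hb
    rw [if_neg h, hg, hb, List.map_map]
    refine List.map_congr_left (fun c _ => ?_)
    simpa using pvAbs_center c
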